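-- pv_equiv track=rewrite | github.com/whisoo98/ProblemSolving | 프로그래머스/lv2/17679. ［1차］ 프렌즈4블록/［1차］ 프렌즈4블록.py | boom
-- ===== SOURCE A (Python) =====
-- def isOk(ty,tx,y,x):
--     if ty<0 or ty>=y or tx<0 or tx>=x:
--         return False
--     return True
--
-- def boom(y,x,board):
--     saved = [[0 for _ in range(x)] for _ in range(y)]
--
--     for i in range(y):
--         for j in range(x):
--             ty = i
--             tx = j
--             if board[ty][tx]==0:
--                 continue
--             cnt = 0
--             target = board[ty][tx]
--
--
--             if isOk(ty,tx,y,x) and board[ty][tx]==target: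
--                 cnt+=1
--             if isOk(ty+1,tx,y,x) and board[ty+1][tx]==target:
--                 cnt+=1
--             if isOk(ty,tx+1,y,x) and board[ty][tx+1]==target:
--                 cnt+=1
--             if isOk(ty+1,tx+1,y,x) and board[ty+1][tx+1]==target:
--                 cnt+=1
--
--             if cnt == 4:
--                 saved[ty][tx]=1
--                 saved[ty+1][tx]=1
--                 saved[ty][tx+1]=1
--                 saved[ty+1][tx+1]=1
--     bomb = 0
--     for i in range(y):
--         for j in range(x):
--             if saved[i][j]:
--                 board[i][j]=0
--                 bomb +=1
--     return bomb
-- ===== SOURCE B (Python) =====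
-- # Single combined pass: instead of marking a boolean grid and re-scanning it,
-- # test each cell directly against the four 2x2 corners that could cover it,
-- # reading from a snapshot of the board (board is mutated in place like A).
-- def boom(y, x, board):
--     orig = [list(row) for row in board]
--
--     def is_corner(a, b):
--         if a < 0 or b < 0 or a + 1 >= y or b + 1 >= x:
--             return False
--         v = orig[a][b]
--         return v != 0 and orig[a + 1][b] == v and orig[a][b + 1] == v and orig[a + 1][b + 1] == v
--
--     bomb = 0
--     for i in range(y):
--         for j in range(x):
--             if is_corner(i, j) or is_corner(i - 1, j) or is_corner(i, j - 1) or is_corner(i - 1, j - 1):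
--                 board[i][j] = 0
--                 bomb += 1
--     return bomb
-- ===== Notes on version B (the rewrite author's own statement) =====
-- stated objective: simpler
-- what changed: A marks matched 2x2 blocks into an auxiliary boolean grid and then re-scans the whole grid to count and zero marks; B drops the auxiliary grid entirely and makes one combined pass that counts/zeroes each cell by directly testing the four possible 2x2 corners covering it against a snapshot of the board.
import Mathlib
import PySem

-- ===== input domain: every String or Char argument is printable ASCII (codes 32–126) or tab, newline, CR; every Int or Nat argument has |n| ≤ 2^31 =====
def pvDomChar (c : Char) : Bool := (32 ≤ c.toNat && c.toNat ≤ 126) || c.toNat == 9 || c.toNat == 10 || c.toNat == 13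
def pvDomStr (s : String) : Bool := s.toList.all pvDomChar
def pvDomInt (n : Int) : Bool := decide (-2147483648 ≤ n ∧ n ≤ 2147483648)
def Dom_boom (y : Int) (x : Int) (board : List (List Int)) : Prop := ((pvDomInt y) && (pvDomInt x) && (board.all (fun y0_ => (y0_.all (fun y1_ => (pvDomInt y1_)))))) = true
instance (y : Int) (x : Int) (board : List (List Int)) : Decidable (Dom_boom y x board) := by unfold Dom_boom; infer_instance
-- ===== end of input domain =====

-- B replaces A's mark-grid-then-rescan with one combined counting pass testing the four
-- covering 2x2 corners per cell (simpler); return-value equivalence — both Pythons also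
-- zero the same cells of `board` in place.

-- ===== PORT A =====
def pvIsOk (ty tx y x : Int) : Bool :=
  if ty < 0 || ty ≥ y || tx < 0 || tx ≥ x then false else true

-- board[i][j] (total form; Pre_ keeps indices in range where A reads)
def pvCellA (g : List (List Int)) (i j : Int) : Int :=
  PySem.List.pyGetD (PySem.List.pyGetD g i []) j 0

-- saved[i][j] = 1
def pvMark (g : List (List Int)) (i j : Int) : List (List Int) :=
  PySem.List.pySetD g i (PySem.List.pySetD (PySem.List.pyGetD g i []) j 1)

def boom (y : Int) (x : Int) (board : List (List Int)) : Int :=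
  let saved0 := (PySem.List.pyRange 0 y 1).map (fun _ =>
    (PySem.List.pyRange 0 x 1).map (fun _ => (0 : Int)))
  let saved := (PySem.List.pyRange 0 y 1).foldl (fun saved i =>
    (PySem.List.pyRange 0 x 1).foldl (fun saved j =>
      if pvCellA board i j = 0 then saved
      else
        let target := pvCellA board i j
        let cnt : Int :=
          (if pvIsOk i j y x && (pvCellA board i j == target) then 1 else 0)
          + (if pvIsOk (i+1) j y x && (pvCellA board (i+1) j == target) then 1 else 0)
          + (if pvIsOk i (j+1) y x && (pvCellA board i (j+1) == target) then 1 else 0)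
          + (if pvIsOk (i+1) (j+1) y x && (pvCellA board (i+1) (j+1) == target) then 1 else 0)
        if cnt = 4 then
          pvMark (pvMark (pvMark (pvMark saved i j) (i+1) j) i (j+1)) (i+1) (j+1)
        else saved) saved) saved0
  (PySem.List.pyRange 0 y 1).foldl (fun b i =>
    (PySem.List.pyRange 0 x 1).foldl (fun b j =>
      if pvCellA saved i j ≠ 0 then b + 1 else b) b) 0

-- ===== PORT B =====
def pvCellB (g : List (List Int)) (i j : Int) : Int :=
  PySem.List.pyGetD (PySem.List.pyGetD g i []) j 0

def pvIsCorner (y x : Int) (orig : List (List Int)) (a b : Int) : Bool :=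
  if a < 0 || b < 0 || a + 1 ≥ y || b + 1 ≥ x then false
  else
    let v := pvCellB orig a b
    (!(v == 0)) && (pvCellB orig (a+1) b == v) && (pvCellB orig a (b+1) == v)
      && (pvCellB orig (a+1) (b+1) == v)

def boom_alt (y : Int) (x : Int) (board : List (List Int)) : Int :=
  let orig := board.map (fun row => row)
  (PySem.List.pyRange 0 y 1).foldl (fun bomb i =>
    (PySem.List.pyRange 0 x 1).foldl (fun bomb j =>
      if pvIsCorner y x orig i j || pvIsCorner y x orig (i-1) j
          || pvIsCorner y x orig i (j-1) || pvIsCorner y x orig (i-1) (j-1)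
      then bomb + 1 else bomb) bomb) 0

-- ===== PRECONDITION & SPEC =====
-- Exactly the inputs where Python A returns: when both loops are nonempty, A indexes
-- board[i][j] for all 0 ≤ i < y, 0 ≤ j < x, so it raises IndexError unless the first y
-- rows exist and each has at least x entries.
def Pre_boom (y : Int) (x : Int) (board : List (List Int)) : Prop :=
  y ≤ 0 ∨ x ≤ 0 ∨ (y ≤ (board.length : Int) ∧ ∀ row ∈ board.take y.toNat, x ≤ (row.length : Int))
instance (y : Int) (x : Int) (board : List (List Int)) : Decidable (Pre_boom y x board) := by
  unfold Pre_boom; infer_instance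

def pvWitness_boom : Int × Int × List (List Int) := (2, 3, [[1, 1, 2], [1, 1, 3]])

def Spec_boom (y : Int) (x : Int) (board : List (List Int)) (out : Int) : Prop := out = boom_alt y x board
instance (y : Int) (x : Int) (board : List (List Int)) (out : Int) : Decidable (Spec_boom y x board out) := by unfold Spec_boom; infer_instance

-- ===== CLAIM (what is proved, stated in full; the proofs are below) =====
def Claim_equal_boom : Prop := ∀ (y : Int) (x : Int) (board : List (List Int)), Dom_boom y x board → Pre_boom y x board → Spec_boom y x board (boom y x board)


-- ===== LEMMAS AND PROOFS =====


-- proof-side names for the pieces of the two loops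
def pvCorners (y x : Int) : List (Int × Int) :=
  (PySem.List.pyRange 0 y 1).flatMap (fun i => (PySem.List.pyRange 0 x 1).map (fun j => (i, j)))

def pvStep (y x : Int) (board : List (List Int)) (g : List (List Int)) (p : Int × Int) :
    List (List Int) :=
  if pvCellA board p.1 p.2 = 0 then g
  else if
      ((if pvIsOk p.1 p.2 y x && (pvCellA board p.1 p.2 == pvCellA board p.1 p.2) then (1:Int) else 0)
       + (if pvIsOk (p.1+1) p.2 y x && (pvCellA board (p.1+1) p.2 == pvCellA board p.1 p.2) then 1 else 0)
       + (if pvIsOk p.1 (p.2+1) y x && (pvCellA board p.1 (p.2+1) == pvCellA board p.1 p.2) then 1 else 0)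
       + (if pvIsOk (p.1+1) (p.2+1) y x && (pvCellA board (p.1+1) (p.2+1) == pvCellA board p.1 p.2) then 1 else 0)) = 4
    then
      pvMark (pvMark (pvMark (pvMark g p.1 p.2) (p.1+1) p.2) p.1 (p.2+1)) (p.1+1) (p.2+1)
    else g

def pvHit (y x : Int) (board : List (List Int)) (i j : Int) : Bool :=
  decide (pvCellA board i j ≠ 0 ∧ i + 1 < y ∧ j + 1 < x ∧
    pvCellA board (i+1) j = pvCellA board i j ∧ pvCellA board i (j+1) = pvCellA board i j ∧
    pvCellA board (i+1) (j+1) = pvCellA board i j)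

def pvShape (Y X : Nat) (g : List (List Int)) : Prop :=
  g.length = Y ∧ ∀ r ∈ g, r.length = X

theorem pv_foldl2 {α β γ : Type} (out : List α) (inn : List β) (F : γ → α → β → γ) (init : γ) :
    out.foldl (fun s i => inn.foldl (fun s j => F s i j) s) init
      = (out.flatMap (fun i => inn.map (fun j => (i, j)))).foldl (fun s p => F s p.1 p.2) init := by
  induction out generalizing init with
  | nil => rfl
  | cons a l ih => simp [List.foldl_append, List.foldl_map, ih]

theorem pv_countP_congr {α : Type} (l : List α) (p q : α → Bool) (h : ∀ a ∈ l, p a = q a) :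
    l.countP p = l.countP q := by
  induction l with
  | nil => rfl
  | cons a t ih =>
    simp only [List.countP_cons, h a (by simp)]
    rw [ih (fun b hb => h b (by simp [hb]))]

theorem pv_mem_corners (y x : Int) (c : Int × Int) :
    c ∈ pvCorners y x ↔ (0 ≤ c.1 ∧ c.1 < y ∧ 0 ≤ c.2 ∧ c.2 < x) := by
  obtain ⟨i, j⟩ := c
  simp [pvCorners, List.mem_flatMap, PySem.List.mem_pyRange_one]
  tauto

theorem pvIsOk_iff (ty tx y x : Int) :
    pvIsOk ty tx y x = true ↔ (0 ≤ ty ∧ ty < y ∧ 0 ≤ tx ∧ tx < x) := by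
  simp only [pvIsOk]
  split_ifs with h <;> simp_all <;> omega

theorem pvStep_eq (y x : Int) (board : List (List Int)) (g : List (List Int)) (p : Int × Int)
    (hp1 : 0 ≤ p.1) (hp1y : p.1 < y) (hp2 : 0 ≤ p.2) (hp2x : p.2 < x) :
    pvStep y x board g p =
      if pvHit y x board p.1 p.2 then
        pvMark (pvMark (pvMark (pvMark g p.1 p.2) (p.1+1) p.2) p.1 (p.2+1)) (p.1+1) (p.2+1)
      else g := by
  obtain ⟨i, j⟩ := p
  simp only at hp1 hp1y hp2 hp2x
  simp only [pvStep]
  by_cases hc : pvCellA board i j = 0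
  · simp [hc, pvHit]
  · rw [if_neg hc]
    have h1 : (pvIsOk i j y x && (pvCellA board i j == pvCellA board i j)) = true := by
      simp only [beq_self_eq_true, Bool.and_true, pvIsOk_iff]
      omega
    have hb2 : (pvIsOk (i+1) j y x && (pvCellA board (i+1) j == pvCellA board i j)) = true
        ↔ (i + 1 < y ∧ pvCellA board (i+1) j = pvCellA board i j) := by
      simp only [Bool.and_eq_true, pvIsOk_iff, beq_iff_eq]
      constructor
      · rintro ⟨⟨_, h, _, _⟩, he⟩; exact ⟨h, he⟩
      · rintro ⟨h, he⟩; exact ⟨⟨by omega, h, by omega, by omega⟩, he⟩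
    have hb3 : (pvIsOk i (j+1) y x && (pvCellA board i (j+1) == pvCellA board i j)) = true
        ↔ (j + 1 < x ∧ pvCellA board i (j+1) = pvCellA board i j) := by
      simp only [Bool.and_eq_true, pvIsOk_iff, beq_iff_eq]
      constructor
      · rintro ⟨⟨_, _, _, h⟩, he⟩; exact ⟨h, he⟩
      · rintro ⟨h, he⟩; exact ⟨⟨by omega, by omega, by omega, h⟩, he⟩
    have hb4 : (pvIsOk (i+1) (j+1) y x && (pvCellA board (i+1) (j+1) == pvCellA board i j)) = true
        ↔ (i + 1 < y ∧ j + 1 < x ∧ pvCellA board (i+1) (j+1) = pvCellA board i j) := by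
      simp only [Bool.and_eq_true, pvIsOk_iff, beq_iff_eq]
      constructor
      · rintro ⟨⟨_, h, _, h'⟩, he⟩; exact ⟨h, h', he⟩
      · rintro ⟨h, h', he⟩; exact ⟨⟨by omega, h, by omega, h'⟩, he⟩
    have hsum : ((if pvIsOk i j y x && (pvCellA board i j == pvCellA board i j) then (1:Int) else 0)
       + (if pvIsOk (i+1) j y x && (pvCellA board (i+1) j == pvCellA board i j) then 1 else 0)
       + (if pvIsOk i (j+1) y x && (pvCellA board i (j+1) == pvCellA board i j) then 1 else 0)
       + (if pvIsOk (i+1) (j+1) y x && (pvCellA board (i+1) (j+1) == pvCellA board i j) then 1 else 0)) = 4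
        ↔ ((pvIsOk (i+1) j y x && (pvCellA board (i+1) j == pvCellA board i j)) = true
           ∧ (pvIsOk i (j+1) y x && (pvCellA board i (j+1) == pvCellA board i j)) = true
           ∧ (pvIsOk (i+1) (j+1) y x && (pvCellA board (i+1) (j+1) == pvCellA board i j)) = true) := by
      rw [if_pos h1]
      rcases Bool.eq_false_or_eq_true (pvIsOk (i+1) j y x && (pvCellA board (i+1) j == pvCellA board i j)) with c2 | c2 <;>
      rcases Bool.eq_false_or_eq_true (pvIsOk i (j+1) y x && (pvCellA board i (j+1) == pvCellA board i j)) with c3 | c3 <;>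
      rcases Bool.eq_false_or_eq_true (pvIsOk (i+1) (j+1) y x && (pvCellA board (i+1) (j+1) == pvCellA board i j)) with c4 | c4 <;>
      simp [c2, c3, c4]
    have hhit : pvHit y x board i j = true
        ↔ ((pvIsOk (i+1) j y x && (pvCellA board (i+1) j == pvCellA board i j)) = true
           ∧ (pvIsOk i (j+1) y x && (pvCellA board i (j+1) == pvCellA board i j)) = true
           ∧ (pvIsOk (i+1) (j+1) y x && (pvCellA board (i+1) (j+1) == pvCellA board i j)) = true) := by
      simp only [pvHit, decide_eq_true_eq, hb2, hb3, hb4]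
      constructor
      · rintro ⟨_, hy', hx', e2, e3, e4⟩
        exact ⟨⟨hy', e2⟩, ⟨hx', e3⟩, hy', hx', e4⟩
      · rintro ⟨⟨hy', e2⟩, ⟨hx', e3⟩, _, _, e4⟩
        exact ⟨hc, hy', hx', e2, e3, e4⟩
    have key := hsum.trans hhit.symm
    by_cases hq : pvHit y x board i j = true
    · rw [if_pos hq, if_pos (key.mpr hq)]
    · rw [if_neg hq, if_neg (fun hs => hq (key.mp hs))]

theorem pvShape_mark (Y X : Nat) (g : List (List Int)) (hs : pvShape Y X g) (a b : Int)
    (ha : 0 ≤ a) (haY : a.toNat < Y) :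
    pvShape Y X (pvMark g a b) := by
  obtain ⟨hlen, hrow⟩ := hs
  constructor
  · simp [pvMark, PySem.List.length_pySetD, hlen]
  · intro r hr
    rw [pvMark, PySem.List.pySetD_of_nonneg _ _ ha] at hr
    rcases List.mem_or_eq_of_mem_set hr with h | h
    · exact hrow r h
    · subst h
      rw [PySem.List.length_pySetD, PySem.List.pyGetD_eq_getElem _ _ ha (by omega)]
      exact hrow _ (List.getElem_mem _)

theorem pvCellA_mark (Y X : Nat) (g : List (List Int)) (hs : pvShape Y X g) (a b p q : Int)
    (ha : 0 ≤ a) (haY : a.toNat < Y) (hb : 0 ≤ b) (hbX : b.toNat < X)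
    (hp : 0 ≤ p) (hpY : p.toNat < Y) (hq : 0 ≤ q) (hqX : q.toNat < X) :
    pvCellA (pvMark g a b) p q = if p = a ∧ q = b then 1 else pvCellA g p q := by
  obtain ⟨hlen, hrow⟩ := hs
  have hrl : ∀ (n : Nat) (h : n < g.length), g[n].length = X := fun n h => hrow _ (List.getElem_mem _)
  have hbrow : (PySem.List.pyGetD g a []).length = X := by
    rw [PySem.List.pyGetD_eq_getElem _ _ ha (by omega)]
    exact hrl _ (by omega)
  simp only [pvCellA, pvMark, PySem.List.pySetD_of_nonneg _ _ ha, PySem.List.pySetD_of_nonneg _ _ hb]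
  rw [PySem.List.pyGetD_eq_getElem _ _ hp (by simp only [List.length_set]; omega),
      PySem.List.pyGetD_eq_getElem (xs := g) _ hp (by omega)]
  rw [List.getElem_set]
  by_cases hpa : p = a
  · have hna : a.toNat = p.toNat := by omega
    rw [if_pos hna]
    rw [PySem.List.pyGetD_eq_getElem _ _ hq (by simp only [List.length_set]; rw [hbrow]; omega),
        PySem.List.pyGetD_eq_getElem _ _ hq (by rw [hrl _ (by omega)]; omega)]
    rw [List.getElem_set]
    have hga : PySem.List.pyGetD g a [] = g[p.toNat] := by
      rw [PySem.List.pyGetD_eq_getElem _ _ ha (by omega)]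
      congr 1
      try omega
    by_cases hqb : q = b
    · have hnb : b.toNat = q.toNat := by omega
      simp [hnb, hpa, hqb]
    · have hnb : ¬ (b.toNat = q.toNat) := by omega
      simp [hnb, hpa, hqb, hga]
  · have hna : ¬ (a.toNat = p.toNat) := by omega
    simp [hna, hpa]

theorem pvFold_char (y x : Int) (board : List (List Int)) (Y X : Nat)
    (hY : (Y : Int) = y) (hX : (X : Int) = x)
    (cs : List (Int × Int)) (hcs : ∀ c ∈ cs, 0 ≤ c.1 ∧ c.1 < y ∧ 0 ≤ c.2 ∧ c.2 < x)
    (g : List (List Int)) (hs : pvShape Y X g)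
    (p q : Int) (hp : 0 ≤ p) (hpY : p < y) (hq : 0 ≤ q) (hqX : q < x) :
    (pvCellA (cs.foldl (pvStep y x board) g) p q ≠ 0 ↔
      (pvCellA g p q ≠ 0 ∨ ∃ c ∈ cs, pvHit y x board c.1 c.2 = true ∧
        (p = c.1 ∨ p = c.1 + 1) ∧ (q = c.2 ∨ q = c.2 + 1))) := by
  induction cs generalizing g with
  | nil =>
    rw [List.foldl_nil]
    simp only [List.not_mem_nil, false_and, exists_false, or_false]
  | cons c cs ih =>
    obtain ⟨hc1, hc1y, hc2, hc2x⟩ := hcs c (by simp)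
    have hcs' : ∀ c ∈ cs, 0 ≤ c.1 ∧ c.1 < y ∧ 0 ≤ c.2 ∧ c.2 < x :=
      fun c hc => hcs c (by simp [hc])
    rw [List.foldl_cons, pvStep_eq y x board g c hc1 hc1y hc2 hc2x]
    by_cases hhit : pvHit y x board c.1 c.2 = true
    · have hbound : c.1 + 1 < y ∧ c.2 + 1 < x := by
        have := of_decide_eq_true hhit
        exact ⟨this.2.1, this.2.2.1⟩
      have s1 : pvShape Y X (pvMark g c.1 c.2) :=
        pvShape_mark Y X g hs c.1 c.2 hc1 (by omega)
      have s2 : pvShape Y X (pvMark (pvMark g c.1 c.2) (c.1+1) c.2) :=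
        pvShape_mark Y X _ s1 _ _ (by omega) (by omega)
      have s3 : pvShape Y X (pvMark (pvMark (pvMark g c.1 c.2) (c.1+1) c.2) c.1 (c.2+1)) :=
        pvShape_mark Y X _ s2 _ _ (by omega) (by omega)
      have s4 : pvShape Y X (pvMark (pvMark (pvMark (pvMark g c.1 c.2) (c.1+1) c.2) c.1 (c.2+1)) (c.1+1) (c.2+1)) :=
        pvShape_mark Y X _ s3 _ _ (by omega) (by omega)
      rw [if_pos hhit, ih hcs' _ s4]
      have e4 := pvCellA_mark Y X _ s3 (c.1+1) (c.2+1) p q (by omega) (by omega) (by omega) (by omega)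
        hp (by omega) hq (by omega)
      have e3 := pvCellA_mark Y X _ s2 c.1 (c.2+1) p q (by omega) (by omega) (by omega) (by omega)
        hp (by omega) hq (by omega)
      have e2 := pvCellA_mark Y X _ s1 (c.1+1) c.2 p q (by omega) (by omega) (by omega) (by omega)
        hp (by omega) hq (by omega)
      have e1 := pvCellA_mark Y X _ hs c.1 c.2 p q (by omega) (by omega) (by omega) (by omega)
        hp (by omega) hq (by omega)
      rw [e4, e3, e2, e1]
      constructor
      · rintro (h | h)
        · split_ifs at h with h4 h3 h2 h1
          · exact Or.inr ⟨c, by simp, hhit, by omega, by omega⟩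
          · exact Or.inr ⟨c, by simp, hhit, by omega, by omega⟩
          · exact Or.inr ⟨c, by simp, hhit, by omega, by omega⟩
          · exact Or.inr ⟨c, by simp, hhit, by omega, by omega⟩
          · exact Or.inl h
        · obtain ⟨d, hd, hdh, hdc⟩ := h
          exact Or.inr ⟨d, by simp [hd], hdh, hdc⟩
      · rintro (h | ⟨d, hd, hdh, hdc1, hdc2⟩)
        · left
          split_ifs <;> first | exact h | norm_num
        · rcases List.mem_cons.mp hd with rfl | hd'
          · left
            rcases hdc1 with h1 | h1 <;> rcases hdc2 with h2 | h2 <;>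
              split_ifs <;> first | (exfalso; omega) | norm_num
          · exact Or.inr ⟨d, hd', hdh, hdc1, hdc2⟩
    · rw [if_neg hhit, ih hcs' _ hs]
      constructor
      · rintro (h | ⟨d, hd, hdh, hdc⟩)
        · exact Or.inl h
        · exact Or.inr ⟨d, by simp [hd], hdh, hdc⟩
      · rintro (h | ⟨d, hd, hdh, hdc⟩)
        · exact Or.inl h
        · rcases List.mem_cons.mp hd with rfl | hd'
          · exact absurd hdh hhit
          · exact Or.inr ⟨d, hd', hdh, hdc⟩

theorem pv_isCorner_iff (y x : Int) (board : List (List Int)) (a b : Int) :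
    pvIsCorner y x board a b = true ↔ (0 ≤ a ∧ 0 ≤ b ∧ pvHit y x board a b = true) := by
  simp only [pvIsCorner, pvHit, pvCellB, pvCellA]
  split_ifs with h
  · simp only [false_iff]
    rintro ⟨ha, hb, hhit⟩
    have hh := of_decide_eq_true hhit
    simp only [Bool.or_eq_true, decide_eq_true_eq] at h
    omega
  · simp only [Bool.or_eq_true, decide_eq_true_eq, not_or, not_lt, not_le] at h
    simp only [Bool.and_eq_true, Bool.not_eq_true', beq_eq_false_iff_ne, beq_iff_eq,
      decide_eq_true_eq, ne_eq]
    constructor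
    · rintro ⟨⟨⟨hv, h1⟩, h2⟩, h3⟩
      refine ⟨by omega, by omega, ?_, by omega, by omega, h1, h2, h3⟩
      exact hv
    · rintro ⟨ha, hb, hv, _, _, h1, h2, h3⟩
      exact ⟨⟨⟨hv, h1⟩, h2⟩, h3⟩


def pvSaved0 (y x : Int) : List (List Int) :=
  (PySem.List.pyRange 0 y 1).map (fun _ => (PySem.List.pyRange 0 x 1).map (fun _ => (0 : Int)))

def pvPass2 (y x : Int) (sv : List (List Int)) : Int :=
  (PySem.List.pyRange 0 y 1).foldl (fun b i =>
    (PySem.List.pyRange 0 x 1).foldl (fun b j =>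
      if pvCellA sv i j ≠ 0 then b + 1 else b) b) 0

def pvPassB (y x : Int) (t : List (List Int)) : Int :=
  (PySem.List.pyRange 0 y 1).foldl (fun bomb i =>
    (PySem.List.pyRange 0 x 1).foldl (fun bomb j =>
      if pvIsCorner y x t i j || pvIsCorner y x t (i-1) j
          || pvIsCorner y x t i (j-1) || pvIsCorner y x t (i-1) (j-1)
      then bomb + 1 else bomb) bomb) 0

theorem pv_foldl2_step (y x : Int) (board : List (List Int)) (init : List (List Int)) :
    (PySem.List.pyRange 0 y 1).foldl (fun s i =>
        (PySem.List.pyRange 0 x 1).foldl (fun s j => pvStep y x board s (i, j)) s) init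
      = (pvCorners y x).foldl (pvStep y x board) init :=
  pv_foldl2 _ _ (fun s i j => pvStep y x board s (i, j)) init

theorem pv_count (y x : Int) (P : Int → Int → Prop) [inst : ∀ i j, Decidable (P i j)] :
    (PySem.List.pyRange 0 y 1).foldl (fun b i =>
        (PySem.List.pyRange 0 x 1).foldl (fun b j => if P i j then b + 1 else b) b) 0
      = ((PySem.List.pyRange 0 y 1).map (fun i =>
          ((PySem.List.pyRange 0 x 1).countP (fun j => decide (P i j)) : Int))).sum := by
  simp only [PySem.List.foldl_ite_add_one, PySem.List.foldl_add]
  rw [zero_add]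

theorem pvShape_saved0 (y x : Int) : pvShape y.toNat x.toNat (pvSaved0 y x) := by
  constructor
  · simp [pvSaved0, PySem.List.length_pyRange_one]
  · intro r hr
    simp only [pvSaved0, List.mem_map] at hr
    obtain ⟨_, _, rfl⟩ := hr
    simp [PySem.List.length_pyRange_one]

theorem pvCellA_saved0 (y x p q : Int) (hp : 0 ≤ p) (hpy : p < y) (hq : 0 ≤ q) (hqx : q < x) :
    pvCellA (pvSaved0 y x) p q = 0 := by
  have h1 : (pvSaved0 y x).length = y.toNat := (pvShape_saved0 y x).1
  rw [pvCellA, PySem.List.pyGetD_eq_getElem _ _ hp (by rw [h1]; omega)]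
  have h2 : (pvSaved0 y x)[p.toNat]'(by rw [h1]; omega)
      = (PySem.List.pyRange 0 x 1).map (fun _ => (0 : Int)) := by
    simp [pvSaved0]
  rw [h2, PySem.List.pyGetD_eq_getElem _ _ hq
    (by simp [PySem.List.length_pyRange_one]; omega)]
  simp

theorem pv_exists_iff (y x : Int) (board : List (List Int)) (p q : Int)
    (hp : 0 ≤ p) (hpy : p < y) (hq : 0 ≤ q) (hqx : q < x) :
    (∃ c ∈ pvCorners y x, pvHit y x board c.1 c.2 = true ∧
        (p = c.1 ∨ p = c.1 + 1) ∧ (q = c.2 ∨ q = c.2 + 1))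
      ↔ ((0 ≤ p ∧ 0 ≤ q ∧ pvHit y x board p q = true)
         ∨ (0 ≤ p - 1 ∧ 0 ≤ q ∧ pvHit y x board (p-1) q = true)
         ∨ (0 ≤ p ∧ 0 ≤ q - 1 ∧ pvHit y x board p (q-1) = true)
         ∨ (0 ≤ p - 1 ∧ 0 ≤ q - 1 ∧ pvHit y x board (p-1) (q-1) = true)) := by
  constructor
  · rintro ⟨⟨a, b⟩, hmem, hhit, hc1, hc2⟩
    obtain ⟨ha0, hay, hb0, hbx⟩ := (pv_mem_corners y x (a, b)).1 hmem
    simp only at hhit hc1 hc2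
    rcases hc1 with rfl | h1 <;> rcases hc2 with rfl | h2
    · exact Or.inl ⟨hp, hq, hhit⟩
    · exact Or.inr (Or.inr (Or.inl ⟨hp, by omega, by rwa [show q - 1 = b by omega]⟩))
    · exact Or.inr (Or.inl ⟨by omega, hq, by rwa [show p - 1 = a by omega]⟩)
    · exact Or.inr (Or.inr (Or.inr ⟨by omega, by omega,
        by rwa [show p - 1 = a by omega, show q - 1 = b by omega]⟩))
  · rintro (⟨_, _, h⟩ | ⟨h1, _, h⟩ | ⟨_, h1, h⟩ | ⟨h1, h2, h⟩)
    · refine ⟨(p, q), (pv_mem_corners _ _ _).2 ⟨hp, hpy, hq, hqx⟩, h, by omega, by omega⟩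
    · refine ⟨(p - 1, q), (pv_mem_corners _ _ _).2 ⟨h1, by omega, hq, hqx⟩, h, by omega, by omega⟩
    · refine ⟨(p, q - 1), (pv_mem_corners _ _ _).2 ⟨hp, hpy, h1, by omega⟩, h, by omega, by omega⟩
    · refine ⟨(p - 1, q - 1), (pv_mem_corners _ _ _).2 ⟨h1, by omega, h2, by omega⟩, h, by omega, by omega⟩

-- ===== VERDICT (by name: the statement is the Claim_ definition above) =====
theorem boom_spec : Claim_equal_boom := by
  intro y x board _hdom _hpre
  show boom y x board = boom_alt y x board
  have hA : boom y x board
      = pvPass2 y x ((pvCorners y x).foldl (pvStep y x board) (pvSaved0 y x)) :=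
    congrArg (pvPass2 y x) (pv_foldl2_step y x board (pvSaved0 y x))
  have hB : boom_alt y x board = pvPassB y x board := by
    show pvPassB y x (board.map (fun row => row)) = pvPassB y x board
    rw [List.map_id']
  rw [hA, hB]
  show (PySem.List.pyRange 0 y 1).foldl (fun b i =>
        (PySem.List.pyRange 0 x 1).foldl (fun b j =>
          if pvCellA ((pvCorners y x).foldl (pvStep y x board) (pvSaved0 y x)) i j ≠ 0
          then b + 1 else b) b) 0
      = (PySem.List.pyRange 0 y 1).foldl (fun b i =>
        (PySem.List.pyRange 0 x 1).foldl (fun b j =>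
          if (pvIsCorner y x board i j || pvIsCorner y x board (i-1) j
              || pvIsCorner y x board i (j-1) || pvIsCorner y x board (i-1) (j-1)) = true
          then b + 1 else b) b) 0
  have e1 : (PySem.List.pyRange 0 y 1).foldl (fun b i =>
        (PySem.List.pyRange 0 x 1).foldl (fun b j =>
          if pvCellA ((pvCorners y x).foldl (pvStep y x board) (pvSaved0 y x)) i j ≠ 0
          then b + 1 else b) b) 0
      = ((PySem.List.pyRange 0 y 1).map (fun i =>
          ((PySem.List.pyRange 0 x 1).countP (fun j =>
            decide (pvCellA ((pvCorners y x).foldl (pvStep y x board) (pvSaved0 y x)) i j ≠ 0)) : Int))).sum :=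
    pv_count y x _
  have e2 : (PySem.List.pyRange 0 y 1).foldl (fun b i =>
        (PySem.List.pyRange 0 x 1).foldl (fun b j =>
          if (pvIsCorner y x board i j || pvIsCorner y x board (i-1) j
              || pvIsCorner y x board i (j-1) || pvIsCorner y x board (i-1) (j-1)) = true
          then b + 1 else b) b) 0
      = ((PySem.List.pyRange 0 y 1).map (fun i =>
          ((PySem.List.pyRange 0 x 1).countP (fun j =>
            decide ((pvIsCorner y x board i j || pvIsCorner y x board (i-1) j
              || pvIsCorner y x board i (j-1) || pvIsCorner y x board (i-1) (j-1)) = true)) : Int))).sum :=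
    pv_count y x _
  rw [e1, e2]
  apply congrArg List.sum
  apply List.map_congr_left
  intro i hi
  obtain ⟨hi0, hiy⟩ := (PySem.List.mem_pyRange_one).1 hi
  apply congrArg Nat.cast
  apply pv_countP_congr
  intro j hj
  obtain ⟨hj0, hjx⟩ := (PySem.List.mem_pyRange_one).1 hj
  rw [decide_eq_decide]
  have hchar := pvFold_char y x board y.toNat x.toNat (by omega) (by omega)
    (pvCorners y x) (fun c hc => (pv_mem_corners y x c).1 hc)
    (pvSaved0 y x) (pvShape_saved0 y x) i j hi0 hiy hj0 hjx
  rw [hchar, pvCellA_saved0 y x i j hi0 hiy hj0 hjx]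
  simp only [ne_eq, not_true_eq_false, false_or]
  rw [pv_exists_iff y x board i j hi0 hiy hj0 hjx]
  simp only [Bool.or_eq_true]
  rw [pv_isCorner_iff, pv_isCorner_iff, pv_isCorner_iff, pv_isCorner_iff]
  simp only [or_assoc]
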